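-- pv_equiv track=rewrite | github.com/homechan77/Algorithm | Programmers/programmers_lv2_가장큰정사각형찾기.py | solution
-- ===== SOURCE A (Python) =====
-- def solution(board):
--     rown = len(board)
--     coln = len(board[0])
--     scanwindow = min(rown, coln)
--     while True:
--         for k in range(scanwindow, 0, -1):
--             for i in range(rown-(k-1)):
--                 for j in range(coln-(k-1)):
--                     tmp = []
--                     a = []
--                     for x in range(k):
--                         tmpa = []
--                         for y in range(k):
--                             tmpa.append(board[i+x][j+y])
--                         a.append(tmpa)
--                     [tmp.extend(l) for l in a]
--                     if len(set(tmp)) == 1: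
--                         return k*k
-- ===== SOURCE B (Python) =====
-- def solution(board):
--     m = len(board[0])
--     best = 1
--     prev = [1] * m
--     for i, row in enumerate(board):
--         cur = [1] * m
--         for j in range(1, m):
--             if i > 0 and row[j] == row[j - 1] and row[j] == board[i - 1][j] and row[j] == board[i - 1][j - 1]:
--                 cur[j] = min(prev[j], prev[j - 1], cur[j - 1]) + 1
--                 if cur[j] > best:
--                     best = cur[j]
--         prev = cur
--     return best * best
-- ===== Notes on version B (the rewrite author's own statement) =====
-- stated objective: faster
-- what changed: Replaces A's brute-force rescan of every k x k window for every k (rebuilding and set-testing each window) with the standard one-pass dynamic program 'side of the largest uniform square ending at each cell' using two rolling rows.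
-- outside the precondition, e.g. on solution([[1, 1], [1, 1], [2]]): A returns 4, B raises IndexError; on solution([[1], []]): A returns 1, B returns 1; on solution([]): A raises IndexError, B raises IndexError
import Mathlib
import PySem

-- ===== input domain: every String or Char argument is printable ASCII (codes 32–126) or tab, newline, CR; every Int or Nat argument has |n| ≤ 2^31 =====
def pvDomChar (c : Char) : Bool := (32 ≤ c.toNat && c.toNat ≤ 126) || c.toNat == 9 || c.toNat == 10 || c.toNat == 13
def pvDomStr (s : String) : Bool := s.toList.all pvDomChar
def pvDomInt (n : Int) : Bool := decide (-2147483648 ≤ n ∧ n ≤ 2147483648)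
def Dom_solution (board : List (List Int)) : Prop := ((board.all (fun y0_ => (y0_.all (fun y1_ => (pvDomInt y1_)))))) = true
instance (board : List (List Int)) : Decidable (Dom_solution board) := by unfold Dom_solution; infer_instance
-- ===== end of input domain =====

-- B replaces A's brute-force rescan of every k×k window (cubic-and-more) by the standard
-- dynamic program "largest uniform square ending at each cell" — a single pass, asymptotically faster.

-- ===== PORT A =====
-- A's cell reads board[i+x][j+y] are always in range under Pre_; pyGetD's default is unreached there.
def solution (board : List (List Int)) : Int :=
  let rown : Int := board.length
  let coln : Int := (PySem.List.pyGetD board 0 []).length   -- board[0]: IndexError on [] (excluded by Pre_)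
  let scanwindow : Int := min rown coln
  match (PySem.List.pyRange scanwindow 0 (-1)).findSome? (fun k =>
    (PySem.List.pyRange 0 (rown - (k - 1)) 1).findSome? (fun i =>
      (PySem.List.pyRange 0 (coln - (k - 1)) 1).findSome? (fun j =>
        let a := (PySem.List.pyRange 0 k 1).foldl (fun a x =>
            a ++ [ (PySem.List.pyRange 0 k 1).foldl (fun tmpa y =>
                tmpa ++ [PySem.List.pyGetD (PySem.List.pyGetD board (i + x) []) (j + y) 0]) [] ]) []
        let tmp := a.foldl (fun tmp l => tmp ++ l) []
        if (PySem.Set.ofList tmp).length == 1 then some (k * k) else none))) with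
  | some v => v
  | none => 0   -- Python's 'while True' diverges here (coln = 0); unreached under Pre_

-- ===== PORT B =====
def solution_alt (board : List (List Int)) : Int :=
  let m : Int := (PySem.List.pyGetD board 0 []).length   -- board[0]: IndexError on [] (excluded by Pre_)
  let best : Int := 1
  let prev : List Int := PySem.List.pyRepeat [1] m
  let s := (PySem.List.enumerate board 0).foldl (fun (s : Int × List Int) ir =>
      let best := s.1
      let prev := s.2
      let i := ir.1
      let row := ir.2
      let cur : List Int := PySem.List.pyRepeat [1] m
      let t := (PySem.List.pyRange 1 m 1).foldl (fun (t : Int × List Int) j =>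
          let best := t.1
          let cur := t.2
          if 0 < i ∧ PySem.List.pyGetD row j 0 = PySem.List.pyGetD row (j - 1) 0
             ∧ PySem.List.pyGetD row j 0 = PySem.List.pyGetD (PySem.List.pyGetD board (i - 1) []) j 0
             ∧ PySem.List.pyGetD row j 0 = PySem.List.pyGetD (PySem.List.pyGetD board (i - 1) []) (j - 1) 0 then
            let v := min (min (PySem.List.pyGetD prev j 0) (PySem.List.pyGetD prev (j - 1) 0)) (PySem.List.pyGetD cur (j - 1) 0) + 1
            let cur := PySem.List.pySetD cur j v
            (if best < v then v else best, cur)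
          else (best, cur)) (best, cur)
      (t.1, t.2)) (best, prev)
  s.1 * s.1

-- ===== PRECONDITION & SPEC =====
-- Pre_ excludes: [] (A raises IndexError), boards whose first row is [] (A loops forever), and
-- ragged boards with a row shorter than the first row: on those A usually raises IndexError, but
-- when it finds a uniform square before touching a short row it returns — those accidental corners
-- are excluded too (B may raise there, or happen to return the same value).
def Pre_solution (board : List (List Int)) : Prop :=
  board ≠ [] ∧ 0 < (board.headD []).length ∧ ∀ r ∈ board, (board.headD []).length ≤ r.length
instance (board : List (List Int)) : Decidable (Pre_solution board) := by unfold Pre_solution; infer_instance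
def pvWitness_solution : List (List Int) := [[1, 1], [1, 2]]
def Spec_solution (board : List (List Int)) (out : Int) : Prop := out = solution_alt board
instance (board : List (List Int)) (out : Int) : Decidable (Spec_solution board out) := by unfold Spec_solution; infer_instance

-- ===== CLAIM (what is proved, stated in full; the proofs are below) =====
def Claim_equal_solution : Prop := ∀ (board : List (List Int)), Dom_solution board → Pre_solution board → Spec_solution board (solution board)

-- ===== LEMMAS AND PROOFS =====


-- ----- proof-side restatements of the two ports (definitional equalities) -----

def pvCheckB (b : List (List Int)) (i j k : Int) : Bool :=
  let a := (PySem.List.pyRange 0 k 1).foldl (fun a x =>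
      a ++ [ (PySem.List.pyRange 0 k 1).foldl (fun tmpa y =>
          tmpa ++ [PySem.List.pyGetD (PySem.List.pyGetD b (i + x) []) (j + y) 0]) [] ]) []
  let tmp := a.foldl (fun tmp l => tmp ++ l) []
  (PySem.Set.ofList tmp).length == 1

lemma solution_eq (b : List (List Int)) :
    solution b =
      (match (PySem.List.pyRange (min (b.length : Int) ((PySem.List.pyGetD b 0 []).length : Int)) 0 (-1)).findSome? (fun k =>
        (PySem.List.pyRange 0 ((b.length : Int) - (k - 1)) 1).findSome? (fun i =>
          (PySem.List.pyRange 0 (((PySem.List.pyGetD b 0 []).length : Int) - (k - 1)) 1).findSome? (fun j =>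
            if pvCheckB b i j k then some (k * k) else none))) with
      | some v => v
      | none => 0) := rfl

def pvStepJ (b : List (List Int)) (i : Int) (row prev : List Int) : (Int × List Int) → Int → (Int × List Int) :=
  fun t j =>
    let best := t.1
    let cur := t.2
    if 0 < i ∧ PySem.List.pyGetD row j 0 = PySem.List.pyGetD row (j - 1) 0
       ∧ PySem.List.pyGetD row j 0 = PySem.List.pyGetD (PySem.List.pyGetD b (i - 1) []) j 0
       ∧ PySem.List.pyGetD row j 0 = PySem.List.pyGetD (PySem.List.pyGetD b (i - 1) []) (j - 1) 0 then
      let v := min (min (PySem.List.pyGetD prev j 0) (PySem.List.pyGetD prev (j - 1) 0)) (PySem.List.pyGetD cur (j - 1) 0) + 1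
      let cur := PySem.List.pySetD cur j v
      (if best < v then v else best, cur)
    else (best, cur)

def pvRowFold (b : List (List Int)) (m : Int) (i : Int) (row : List Int) (s : Int × List Int) : Int × List Int :=
  let best := s.1
  let prev := s.2
  let cur : List Int := PySem.List.pyRepeat [1] m
  let t := (PySem.List.pyRange 1 m 1).foldl (pvStepJ b i row prev) (best, cur)
  (t.1, t.2)

lemma solution_alt_eq (b : List (List Int)) :
    solution_alt b =
      (let m : Int := (PySem.List.pyGetD b 0 []).length
       let s := (PySem.List.enumerate b 0).foldl (fun s ir => pvRowFold b m ir.1 ir.2 s) (1, PySem.List.pyRepeat [1] m)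
       s.1 * s.1) := rfl

-- ----- the common mathematical description -----

def pvG (b : List (List Int)) (i j : Nat) : Int := (b.getD i []).getD j 0
def pvN (b : List (List Int)) : Nat := b.length
def pvM (b : List (List Int)) : Nat := (b.headD []).length

/-- the k×k square with top-left corner (i,j) is uniform -/
abbrev pvUnif (b : List (List Int)) (i j k : Nat) : Prop :=
  ∀ x < k, ∀ y < k, pvG b (i + x) (j + y) = pvG b i j

/-- some in-bounds k×k square is uniform -/
abbrev pvHasSq (b : List (List Int)) (k : Nat) : Prop :=
  ∃ i < pvN b, ∃ j < pvM b, (i + k ≤ pvN b ∧ j + k ≤ pvM b) ∧ pvUnif b i j k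

/-- largest uniform-square side -/
def pvK (b : List (List Int)) : Nat := Nat.findGreatest (pvHasSq b) (min (pvN b) (pvM b))

/-- an s×s uniform square has bottom-right corner (i,j) -/
abbrev pvBR (b : List (List Int)) (i j s : Nat) : Prop :=
  (s ≤ i + 1 ∧ s ≤ j + 1) ∧ pvUnif b (i + 1 - s) (j + 1 - s) s

/-- side of the largest uniform square with bottom-right corner (i,j) -/
def pvDp (b : List (List Int)) (i j : Nat) : Nat := Nat.findGreatest (pvBR b i j) (min (i + 1) (j + 1))

def pvDpRow (b : List (List Int)) (i : Nat) : List Int :=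
  (List.range (pvM b)).map (fun j => (pvDp b i j : Int))
def pvCurL (b : List (List Int)) (i j : Nat) : List Int :=
  (List.range (pvM b)).map (fun j' => if j' < j then (pvDp b i j' : Int) else 1)
def pvPartBest (b : List (List Int)) (i j : Nat) (a : Int) : Int :=
  (List.range j).foldl (fun acc j' => max acc (pvDp b i j' : Int)) a
def pvBestG (b : List (List Int)) (i : Nat) : Int :=
  (List.range i).foldl (fun acc i' => pvPartBest b i' (pvM b) acc) 1

-- ----- generic helpers -----

lemma pvFindSome?_if {alpha : Type} (l : List alpha) (p : alpha → Bool) (c : Int) :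
    l.findSome? (fun x => if p x then some c else none) = if l.any p then some c else none := by
  induction l with
  | nil => simp
  | cons h tl ih => by_cases hp : p h <;> simp [hp, ih]

lemma pvSetLen1 (l : List Int) (c : Int) (hc : c ∈ l) :
    ((PySem.Set.ofList l).length = 1 ↔ ∀ x ∈ l, x = c) := by
  constructor
  · intro h x hx
    obtain ⟨a, ha⟩ := List.length_eq_one_iff.mp h
    have hx' : x ∈ PySem.Set.ofList l := (PySem.Set.mem_ofList l x).mpr hx
    have hc' : c ∈ PySem.Set.ofList l := (PySem.Set.mem_ofList l c).mpr hc
    rw [ha] at hx' hc'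
    simp only [List.mem_singleton] at hx' hc'
    exact hx'.trans hc'.symm
  · intro h
    have hall : ∀ y ∈ PySem.Set.ofList l, y = c := by
      intro y hy; exact h y ((PySem.Set.mem_ofList l y).mp hy)
    have hcm : c ∈ PySem.Set.ofList l := (PySem.Set.mem_ofList l c).mpr hc
    have hnd := PySem.Set.nodup_ofList l
    match hl : PySem.Set.ofList l with
    | [] => rw [hl] at hcm; simp at hcm
    | [a] => rfl
    | a :: b :: r =>
      rw [hl] at hall hnd
      have ha := hall a (by simp)
      have hb := hall b (by simp)
      rw [List.nodup_cons] at hnd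
      exact absurd (by simp [ha, hb] : a ∈ b :: r) hnd.1

lemma pvMeq (b : List (List Int)) (hb : b ≠ []) :
    (PySem.List.pyGetD b 0 []) = b.headD [] := by
  cases b with
  | nil => exact absurd rfl hb
  | cons h tl => simp [PySem.List.pyGetD_zero_cons]

-- ----- the A side -----

lemma pvCheck_iff (b : List (List Int)) (i j k : Nat) (hk : 1 ≤ k) :
    pvCheckB b (i : Int) (j : Int) (k : Int) = true ↔ pvUnif b i j k := by
  have hGC : ∀ (x y : Nat), PySem.List.pyGetD (PySem.List.pyGetD b ((i : Int) + (x : Int)) []) ((j : Int) + (y : Int)) 0 = pvG b (i + x) (j + y) := by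
    intro x y
    rw [← Nat.cast_add, ← Nat.cast_add, PySem.List.pyGetD_natCast, PySem.List.pyGetD_natCast]
    rfl
  unfold pvCheckB
  simp only [PySem.List.foldl_append_singleton_eq_map, List.nil_append,
    PySem.List.foldl_append_eq_flatten, PySem.List.pyRange_zero_natCast, List.map_map,
    Function.comp_def, hGC]
  rw [beq_iff_eq, pvSetLen1 _ (pvG b i j) ?hc]
  case hc =>
    simp only [List.mem_flatten, List.mem_map, List.mem_range]
    exact ⟨_, ⟨0, hk, rfl⟩, by
      simp only [List.mem_map, List.mem_range]
      exact ⟨0, hk, by simp⟩⟩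
  · constructor
    · intro h x hx y hy
      apply h (pvG b (i + x) (j + y))
      simp only [List.mem_flatten, List.mem_map, List.mem_range]
      exact ⟨_, ⟨x, hx, rfl⟩, by
        simp only [List.mem_map, List.mem_range]
        exact ⟨y, hy, rfl⟩⟩
    · intro h z hz
      simp only [List.mem_flatten, List.mem_map, List.mem_range] at hz
      obtain ⟨l, ⟨x, hx, rfl⟩, hzl⟩ := hz
      simp only [List.mem_map, List.mem_range] at hzl
      obtain ⟨y, hy, rfl⟩ := hzl
      exact h x hx y hy

lemma pvInner_eq (b : List (List Int)) (hpre : Pre_solution b) (k : Nat)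
    (hk1 : 1 ≤ k) (hkn : k ≤ pvN b) (hkm : k ≤ pvM b) :
    (PySem.List.pyRange 0 ((b.length : Int) - ((k : Int) - 1)) 1).findSome? (fun i =>
      (PySem.List.pyRange 0 (((PySem.List.pyGetD b 0 []).length : Int) - ((k : Int) - 1)) 1).findSome? (fun j =>
        if pvCheckB b i j (k : Int) then some ((k : Int) * (k : Int)) else none))
    = if pvHasSq b k then some (((k * k : Nat) : Int)) else none := by
  have hne := hpre.1
  have hmm : ((PySem.List.pyGetD b 0 []).length : Int) = ((pvM b : Nat) : Int) := by
    rw [pvMeq b hne]; rfl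
  simp only [pvFindSome?_if, hmm]
  have hiff : ((PySem.List.pyRange 0 ((b.length : Int) - ((k : Int) - 1)) 1).any (fun i =>
      (PySem.List.pyRange 0 (((pvM b : Nat) : Int) - ((k : Int) - 1)) 1).any (fun j =>
        pvCheckB b i j (k : Int))) = true) ↔ pvHasSq b k := by
    simp only [List.any_eq_true, PySem.List.mem_pyRange_one]
    constructor
    · rintro ⟨i, ⟨hi0, hiu⟩, j, ⟨hj0, hju⟩, hcheck⟩
      lift i to Nat using hi0 with i'
      lift j to Nat using hj0 with j'
      rw [pvCheck_iff b _ _ _ hk1] at hcheck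
      have hn : (pvN b) = b.length := rfl
      refine ⟨i', by omega, j', by omega, ⟨by omega, by omega⟩, hcheck⟩
    · rintro ⟨i', hi', j', hj', ⟨hik, hjk⟩, hunif⟩
      have hn : (pvN b) = b.length := rfl
      refine ⟨(i' : Int), ⟨by positivity, by omega⟩, (j' : Int), ⟨by positivity, by omega⟩, ?_⟩
      rw [pvCheck_iff b _ _ _ hk1]
      exact hunif
  by_cases h : pvHasSq b k
  · rw [if_pos (hiff.mpr h), if_pos h]
    push_cast
    rfl
  · rw [if_neg (fun hc => h (hiff.mp hc)), if_neg h]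

lemma pvScan_eq (b : List (List Int)) (hpre : Pre_solution b) :
    ∀ w : Nat, w ≤ min (pvN b) (pvM b) →
    (PySem.List.pyRange (w : Int) 0 (-1)).findSome? (fun k =>
      (PySem.List.pyRange 0 ((b.length : Int) - (k - 1)) 1).findSome? (fun i =>
        (PySem.List.pyRange 0 (((PySem.List.pyGetD b 0 []).length : Int) - (k - 1)) 1).findSome? (fun j =>
          if pvCheckB b i j k then some (k * k) else none)))
    = if 0 < Nat.findGreatest (pvHasSq b) w
      then some (((Nat.findGreatest (pvHasSq b) w * Nat.findGreatest (pvHasSq b) w : Nat) : Int))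
      else none := by
  intro w
  induction w with
  | zero =>
    intro _
    rw [show ((0 : Nat) : Int) = 0 by rfl, PySem.List.pyRange_neg_one_eq_nil le_rfl]
    simp
  | succ w ih =>
    intro hw
    have hcons := PySem.List.pyRange_neg_one_cons (a := ((w + 1 : Nat) : Int)) (b := 0)
      (by exact_mod_cast Nat.succ_pos w)
    rw [hcons, List.findSome?_cons]
    have hdown : ((w + 1 : Nat) : Int) - 1 = ((w : Nat) : Int) := by push_cast; ring
    rw [hdown]
    have hw1 : w + 1 ≤ pvN b := le_trans hw (min_le_left _ _)
    have hw2 : w + 1 ≤ pvM b := le_trans hw (min_le_right _ _)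
    have hinner := pvInner_eq b hpre (w + 1) (by omega) hw1 hw2
    push_cast at hinner ⊢
    rw [show (w : Int) + 1 - 1 = (w : Int) from by ring] at hinner
    rw [hinner]
    by_cases hsq : pvHasSq b (w + 1)
    · rw [if_pos hsq, Nat.findGreatest_succ, if_pos hsq]
      simp
    · rw [if_neg hsq, Nat.findGreatest_succ (P := pvHasSq b), if_neg hsq]
      exact ih (le_trans (by omega) hw)

lemma pvHasSq_one (b : List (List Int)) (hpre : Pre_solution b) : pvHasSq b 1 := by
  obtain ⟨hne, hm0, hrow⟩ := hpre
  have hn : 0 < pvN b := List.length_pos_iff.mpr hne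
  have hm : 0 < pvM b := hm0
  refine ⟨0, hn, 0, hm, ⟨by omega, by omega⟩, ?_⟩
  intro x hx y hy
  have hx0 : x = 0 := by omega
  have hy0 : y = 0 := by omega
  subst hx0; subst hy0; rfl

lemma pvK_pos (b : List (List Int)) (hpre : Pre_solution b) : 1 ≤ pvK b := by
  have h1 : 1 ≤ min (pvN b) (pvM b) := by
    have hn : 0 < pvN b := List.length_pos_iff.mpr hpre.1
    have hm : 0 < pvM b := hpre.2.1
    omega
  exact Nat.le_findGreatest h1 (pvHasSq_one b hpre)

lemma pvA_eq (b : List (List Int)) (hpre : Pre_solution b) :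
    solution b = ((pvK b : Int)) * ((pvK b : Int)) := by
  rw [solution_eq]
  have hmin : min (b.length : Int) ((PySem.List.pyGetD b 0 []).length : Int)
      = ((min (pvN b) (pvM b) : Nat) : Int) := by
    rw [pvMeq b hpre.1]; push_cast; rfl
  rw [hmin, pvScan_eq b hpre (min (pvN b) (pvM b)) le_rfl]
  have hK : 0 < Nat.findGreatest (pvHasSq b) (min (pvN b) (pvM b)) := pvK_pos b hpre
  rw [if_pos hK]
  simp [pvK]

-- ----- facts about pvUnif / pvDp -----

lemma pvUnif_sub (b : List (List Int)) {a c s : Nat} (h : pvUnif b a c s)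
    (dx dy s' : Nat) (h1 : dx + s' ≤ s) (h2 : dy + s' ≤ s) :
    pvUnif b (a + dx) (c + dy) s' := by
  intro x hx y hy
  have e1 := h (dx + x) (by omega) (dy + y) (by omega)
  have e2 := h dx (by omega) dy (by omega)
  rw [show a + dx + x = a + (dx + x) from by ring, show c + dy + y = c + (dy + y) from by ring,
    e1, e2]

lemma pvUnif_sub2 (b : List (List Int)) {a c s a' c' s' : Nat} (h : pvUnif b a c s)
    (ha : a ≤ a') (hc : c ≤ c') (h1 : a' - a + s' ≤ s) (h2 : c' - c + s' ≤ s) :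
    pvUnif b a' c' s' := by
  have h3 := pvUnif_sub b h (a' - a) (c' - c) s' h1 h2
  rwa [Nat.add_sub_cancel' ha, Nat.add_sub_cancel' hc] at h3

lemma pvBR_one (b : List (List Int)) (i j : Nat) : pvBR b i j 1 := by
  refine ⟨⟨by omega, by omega⟩, ?_⟩
  intro x hx y hy
  have hx0 : x = 0 := by omega
  have hy0 : y = 0 := by omega
  subst hx0; subst hy0; rfl

lemma pvDp_pos (b : List (List Int)) (i j : Nat) : 1 ≤ pvDp b i j := by
  exact Nat.le_findGreatest (by omega) (pvBR_one b i j)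

lemma pvDp_le (b : List (List Int)) (i j : Nat) : pvDp b i j ≤ min (i + 1) (j + 1) := by
  exact Nat.findGreatest_le _

lemma pvDp_spec (b : List (List Int)) (i j : Nat) : pvBR b i j (pvDp b i j) := by
  exact Nat.findGreatest_spec (by omega) (pvBR_one b i j)

lemma pvDp_zero_left (b : List (List Int)) (j : Nat) : pvDp b 0 j = 1 := by
  have h1 := pvDp_pos b 0 j
  have h2 := pvDp_le b 0 j
  omega

lemma pvDp_zero_right (b : List (List Int)) (i : Nat) : pvDp b i 0 = 1 := by
  have h1 := pvDp_pos b i 0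
  have h2 := pvDp_le b i 0
  omega

lemma pvDp_rec (b : List (List Int)) (i j : Nat) (hi : 1 ≤ i) (hj : 1 ≤ j) :
    pvDp b i j =
      if pvG b i j = pvG b i (j - 1) ∧ pvG b i j = pvG b (i - 1) j ∧ pvG b i j = pvG b (i - 1) (j - 1)
      then min (min (pvDp b (i - 1) j) (pvDp b (i - 1) (j - 1))) (pvDp b i (j - 1)) + 1
      else 1 := by
  have hD1 := pvDp_pos b i j
  have hDle := pvDp_le b i j
  have hspec := pvDp_spec b i j
  set D := pvDp b i j with hDdef
  split_ifs with hc
  · obtain ⟨hc1, hc2, hc3⟩ := hc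
    have hd1s := (pvDp_spec b (i - 1) j).2
    have hd2s := (pvDp_spec b (i - 1) (j - 1)).2
    have hd3s := (pvDp_spec b i (j - 1)).2
    have hd1le := pvDp_le b (i - 1) j
    have hd2le := pvDp_le b (i - 1) (j - 1)
    have hd3le := pvDp_le b i (j - 1)
    have hd1p := pvDp_pos b (i - 1) j
    have hd2p := pvDp_pos b (i - 1) (j - 1)
    have hd3p := pvDp_pos b i (j - 1)
    set d1 := pvDp b (i - 1) j with hd1
    set d2 := pvDp b (i - 1) (j - 1) with hd2
    set d3 := pvDp b i (j - 1) with hd3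
    set t := min (min d1 d2) d3 with ht
    have hti : t ≤ i := by omega
    have htj : t ≤ j := by omega
    have hub : D ≤ t + 1 := by
      by_cases hD2 : 2 ≤ D
      · obtain ⟨⟨hDi, hDj⟩, hU⟩ := hspec
        have h1 : pvBR b (i - 1) j (D - 1) :=
          ⟨⟨by omega, by omega⟩, pvUnif_sub2 b hU (by omega) (by omega) (by omega) (by omega)⟩
        have h2 : pvBR b (i - 1) (j - 1) (D - 1) :=
          ⟨⟨by omega, by omega⟩, pvUnif_sub2 b hU (by omega) (by omega) (by omega) (by omega)⟩
        have h3 : pvBR b i (j - 1) (D - 1) :=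
          ⟨⟨by omega, by omega⟩, pvUnif_sub2 b hU (by omega) (by omega) (by omega) (by omega)⟩
        have g1 : D - 1 ≤ d1 := Nat.le_findGreatest (by omega) h1
        have g2 : D - 1 ≤ d2 := Nat.le_findGreatest (by omega) h2
        have g3 : D - 1 ≤ d3 := Nat.le_findGreatest (by omega) h3
        omega
      · omega
    have hlb : t + 1 ≤ D := by
      apply Nat.le_findGreatest (by omega)
      refine ⟨⟨by omega, by omega⟩, ?_⟩
      by_cases ht0 : t = 0
      · intro x hx y hy
        have hx0 : x = 0 := by omega
        have hy0 : y = 0 := by omega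
        subst hx0; subst hy0; rfl
      · have hA1 : pvUnif b (i - t) (j + 1 - t) t :=
          pvUnif_sub2 b hd1s (by omega) (by omega) (by omega) (by omega)
        have hA2 : pvUnif b (i + 1 - t) (j - t) t :=
          pvUnif_sub2 b hd3s (by omega) (by omega) (by omega) (by omega)
        have hC : pvUnif b (i - t) (j - t) t :=
          pvUnif_sub2 b hd2s (by omega) (by omega) (by omega) (by omega)
        have hCtl : pvG b (i - 1) (j - 1) = pvG b (i - t) (j - t) := by
          have e := hC (t - 1) (by omega) (t - 1) (by omega)
          rwa [show i - t + (t - 1) = i - 1 from by omega,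
            show j - t + (t - 1) = j - 1 from by omega] at e
        have eA1 : pvG b (i - 1) j = pvG b (i - t) (j + 1 - t) := by
          have e := hA1 (t - 1) (by omega) (t - 1) (by omega)
          rwa [show i - t + (t - 1) = i - 1 from by omega,
            show j + 1 - t + (t - 1) = j from by omega] at e
        have eA2 : pvG b i (j - 1) = pvG b (i + 1 - t) (j - t) := by
          have e := hA2 (t - 1) (by omega) (t - 1) (by omega)
          rwa [show i + 1 - t + (t - 1) = i from by omega,
            show j - t + (t - 1) = j - 1 from by omega] at e
        intro x hx y hy
        rw [show i + 1 - (t + 1) = i - t from by omega, show j + 1 - (t + 1) = j - t from by omega]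
        by_cases hxt : x < t
        · by_cases hyt : y < t
          · exact hC x hxt y hyt
          · have hy' : y = t := by omega
            subst hy'
            have e1 := hA1 x (by omega) (t - 1) (by omega)
            rw [show j + 1 - t + (t - 1) = j from by omega] at e1
            rw [show j - t + t = j from by omega, e1, ← eA1, ← hc2, hc3, hCtl]
        · have hx' : x = t := by omega
          subst hx'
          by_cases hyt : y < t
          · have e1 := hA2 (t - 1) (by omega) y (by omega)
            rw [show i + 1 - t + (t - 1) = i from by omega] at e1
            rw [show i - t + t = i from by omega, e1, ← eA2, ← hc1, hc3, hCtl]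
          · have hy' : y = t := by omega
            subst hy'
            rw [show i - t + t = i from by omega, show j - t + t = j from by omega, hc3, hCtl]
    omega
  · by_cases hD2 : 2 ≤ D
    · exfalso
      obtain ⟨⟨hDi, hDj⟩, hU⟩ := hspec
      have c00 := hU (D - 1) (by omega) (D - 1) (by omega)
      have c01 := hU (D - 1) (by omega) (D - 2) (by omega)
      have c10 := hU (D - 2) (by omega) (D - 1) (by omega)
      have c11 := hU (D - 2) (by omega) (D - 2) (by omega)
      rw [show i + 1 - D + (D - 1) = i from by omega, show j + 1 - D + (D - 1) = j from by omega] at c00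
      rw [show i + 1 - D + (D - 1) = i from by omega, show j + 1 - D + (D - 2) = j - 1 from by omega] at c01
      rw [show i + 1 - D + (D - 2) = i - 1 from by omega, show j + 1 - D + (D - 1) = j from by omega] at c10
      rw [show i + 1 - D + (D - 2) = i - 1 from by omega, show j + 1 - D + (D - 2) = j - 1 from by omega] at c11
      exact hc ⟨c00.trans c01.symm, c00.trans c10.symm, c00.trans c11.symm⟩
    · omega

-- ----- the B side -----

lemma pvPartBest_succ (b : List (List Int)) (i j : Nat) (a : Int) :
    pvPartBest b i (j + 1) a = max (pvPartBest b i j a) ((pvDp b i j : Nat) : Int) := by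
  unfold pvPartBest
  rw [List.range_succ, List.foldl_append]
  rfl

lemma pvPartBest_ge (b : List (List Int)) (i j : Nat) (a : Int) : a ≤ pvPartBest b i j a :=
  (PySem.List.le_foldl_max_int (List.range j) (fun j' => ((pvDp b i j' : Nat) : Int)) a).1

lemma pvCurL_succ_one (b : List (List Int)) (i j : Nat) (h : pvDp b i j = 1) :
    pvCurL b i (j + 1) = pvCurL b i j := by
  unfold pvCurL
  apply List.map_congr_left
  intro a ha
  by_cases haj : a = j
  · subst haj
    simp [h]
  · by_cases h1 : a < j
    · rw [if_pos (by omega), if_pos h1]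
    · rw [if_neg (by omega), if_neg h1]

lemma pvCurL_one (b : List (List Int)) (i : Nat) :
    pvCurL b i 1 = List.replicate (pvM b) 1 := by
  unfold pvCurL
  rw [List.eq_replicate_iff]
  refine ⟨by simp, ?_⟩
  intro x hx
  simp only [List.mem_map, List.mem_range] at hx
  obtain ⟨j', hj', rfl⟩ := hx
  by_cases h0 : j' < 1
  · have hj0 : j' = 0 := by omega
    subst hj0
    simp [pvDp_zero_right]
  · simp [h0]

lemma pvCurL_full (b : List (List Int)) (i : Nat) : pvCurL b i (pvM b) = pvDpRow b i := by
  unfold pvCurL pvDpRow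
  apply List.map_congr_left
  intro a ha
  simp only [List.mem_range] at ha
  rw [if_pos ha]

lemma pvStep_eq (b : List (List Int)) (hpre : Pre_solution b) (i j : Nat)
    (hi : i < pvN b) (hj1 : 1 ≤ j) (hjm : j < pvM b) (best0 : Int) (hb0 : 1 ≤ best0)
    (prev : List Int)
    (hprev : prev = if i = 0 then List.replicate (pvM b) 1 else pvDpRow b (i - 1)) :
    pvStepJ b (i : Int) (PySem.List.pyGetD b (i : Int) []) prev
        (pvPartBest b i j best0, pvCurL b i j) (j : Int)
      = (pvPartBest b i (j + 1) best0, pvCurL b i (j + 1)) := by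
  have hrowlen : pvM b ≤ (b.getD i []).length := by
    have hmem : b.getD i [] ∈ b := by
      rw [List.getD_eq_getElem _ _ hi]
      exact List.getElem_mem hi
    exact hpre.2.2 _ hmem
  have hjc : ((j : Int) - 1) = ((j - 1 : Nat) : Int) := by omega
  have h1 : PySem.List.pyGetD (PySem.List.pyGetD b (i : Int) []) (j : Int) 0 = pvG b i j := by
    rw [PySem.List.pyGetD_natCast, PySem.List.pyGetD_natCast]; rfl
  have h2 : PySem.List.pyGetD (PySem.List.pyGetD b (i : Int) []) ((j : Int) - 1) 0 = pvG b i (j - 1) := by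
    rw [hjc, PySem.List.pyGetD_natCast, PySem.List.pyGetD_natCast]; rfl
  simp only [pvStepJ, h1, h2]
  by_cases hi0 : i = 0
  · subst hi0
    rw [if_neg (by simp)]
    have hPB : pvPartBest b 0 (j + 1) best0 = pvPartBest b 0 j best0 := by
      rw [pvPartBest_succ, pvDp_zero_left]
      have := pvPartBest_ge b 0 j best0
      omega
    rw [hPB, pvCurL_succ_one b 0 j (pvDp_zero_left b j)]
  · have hi1 : 1 ≤ i := by omega
    have hic : ((i : Int) - 1) = ((i - 1 : Nat) : Int) := by omega
    have h3 : PySem.List.pyGetD (PySem.List.pyGetD b ((i : Int) - 1) []) (j : Int) 0 = pvG b (i - 1) j := by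
      rw [hic, PySem.List.pyGetD_natCast, PySem.List.pyGetD_natCast]; rfl
    have h4 : PySem.List.pyGetD (PySem.List.pyGetD b ((i : Int) - 1) []) ((j : Int) - 1) 0 = pvG b (i - 1) (j - 1) := by
      rw [hic, hjc, PySem.List.pyGetD_natCast, PySem.List.pyGetD_natCast]; rfl
    have hprev' : prev = pvDpRow b (i - 1) := by rw [hprev, if_neg hi0]
    have h5 : PySem.List.pyGetD prev (j : Int) 0 = ((pvDp b (i - 1) j : Nat) : Int) := by
      rw [hprev', PySem.List.pyGetD_natCast]
      exact PySem.List.getD_map_range _ _ _ _ hjm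
    have h6 : PySem.List.pyGetD prev ((j : Int) - 1) 0 = ((pvDp b (i - 1) (j - 1) : Nat) : Int) := by
      rw [hprev', hjc, PySem.List.pyGetD_natCast]
      exact PySem.List.getD_map_range _ _ _ _ (by omega)
    have h7 : PySem.List.pyGetD (pvCurL b i j) ((j : Int) - 1) 0 = ((pvDp b i (j - 1) : Nat) : Int) := by
      rw [hjc, PySem.List.pyGetD_natCast]
      unfold pvCurL
      rw [PySem.List.getD_map_range _ _ _ _ (by omega), if_pos (by omega)]
    simp only [h3, h4, h5, h6, h7]
    by_cases hcond : pvG b i j = pvG b i (j - 1) ∧ pvG b i j = pvG b (i - 1) j ∧ pvG b i j = pvG b (i - 1) (j - 1)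
    · rw [if_pos ⟨by exact_mod_cast hi1, hcond.1, hcond.2.1, hcond.2.2⟩]
      have hv : ((pvDp b i j : Nat) : Int)
          = min (min ((pvDp b (i - 1) j : Nat) : Int) ((pvDp b (i - 1) (j - 1) : Nat) : Int)) ((pvDp b i (j - 1) : Nat) : Int) + 1 := by
        rw [pvDp_rec b i j hi1 hj1, if_pos hcond]
        push_cast
        rfl
      rw [← hv]
      have hset : PySem.List.pySetD (pvCurL b i j) (j : Int) ((pvDp b i j : Nat) : Int) = pvCurL b i (j + 1) := by
        apply List.ext_getElem
        · rw [PySem.List.length_pySetD]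
          unfold pvCurL
          simp
        · intro tt ht1 ht2
          have hlt : tt < pvM b := by
            rw [PySem.List.length_pySetD] at ht1
            unfold pvCurL at ht1
            simpa using ht1
          have hcl : (pvCurL b i j).length = pvM b := by unfold pvCurL; simp
          have e1 : (PySem.List.pySetD (pvCurL b i j) (j : Int) ((pvDp b i j : Nat) : Int))[tt] =
              PySem.List.pyGetD (PySem.List.pySetD (pvCurL b i j) (j : Int) ((pvDp b i j : Nat) : Int)) (tt : Int) 0 := by
            rw [PySem.List.pyGetD_natCast, List.getD_eq_getElem _ _ ht1]
          have e2 : (pvCurL b i (j + 1))[tt] = PySem.List.pyGetD (pvCurL b i (j + 1)) (tt : Int) 0 := by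
            rw [PySem.List.pyGetD_natCast, List.getD_eq_getElem _ _ ht2]
          rw [e1, e2, PySem.List.pyGetD_pySetD_natCast _ _ _ _ _ (by omega)]
          unfold pvCurL
          rw [PySem.List.pyGetD_natCast, PySem.List.pyGetD_natCast,
            PySem.List.getD_map_range _ _ _ _ hlt, PySem.List.getD_map_range _ _ _ _ hlt]
          by_cases htj : tt = j
          · subst htj
            rw [if_pos rfl, if_pos (by omega)]
          · rw [if_neg htj]
            by_cases htlt : tt < j
            · rw [if_pos htlt, if_pos (by omega)]
            · rw [if_neg htlt, if_neg (by omega)]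
      rw [hset]
      have hPB : (if pvPartBest b i j best0 < ((pvDp b i j : Nat) : Int) then ((pvDp b i j : Nat) : Int) else pvPartBest b i j best0)
          = pvPartBest b i (j + 1) best0 := by
        rw [pvPartBest_succ]
        omega
      rw [hPB]
    · rw [if_neg (fun hfull => hcond hfull.2)]
      have hdp1 : pvDp b i j = 1 := by rw [pvDp_rec b i j hi1 hj1, if_neg hcond]
      have hPB : pvPartBest b i (j + 1) best0 = pvPartBest b i j best0 := by
        rw [pvPartBest_succ, hdp1]
        have := pvPartBest_ge b i j best0
        omega
      rw [hPB, pvCurL_succ_one b i j hdp1]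

lemma pvInnerFold (b : List (List Int)) (hpre : Pre_solution b) (i : Nat) (hi : i < pvN b)
    (best0 : Int) (hb0 : 1 ≤ best0) (prev : List Int)
    (hprev : prev = if i = 0 then List.replicate (pvM b) 1 else pvDpRow b (i - 1)) :
    ∀ c j : Nat, 1 ≤ j → j + c = pvM b →
    (PySem.List.pyRange (j : Int) ((pvM b : Nat) : Int) 1).foldl
        (pvStepJ b (i : Int) (PySem.List.pyGetD b (i : Int) []) prev)
        (pvPartBest b i j best0, pvCurL b i j)
      = (pvPartBest b i (pvM b) best0, pvCurL b i (pvM b)) := by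
  intro c
  induction c with
  | zero =>
    intro j hj1 hjsum
    have hjm : j = pvM b := by omega
    subst hjm
    rw [PySem.List.pyRange_one_eq_nil le_rfl]
    rfl
  | succ c ih =>
    intro j hj1 hjsum
    have hjm : j < pvM b := by omega
    rw [PySem.List.pyRange_one_cons (by exact_mod_cast hjm), List.foldl_cons,
      pvStep_eq b hpre i j hi hj1 hjm best0 hb0 prev hprev,
      show ((j : Int) + 1) = ((j + 1 : Nat) : Int) from by push_cast; ring]
    exact ih (j + 1) (by omega) (by omega)

lemma pvRowFold_eq (b : List (List Int)) (hpre : Pre_solution b) (i : Nat) (hi : i < pvN b)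
    (best0 : Int) (hb0 : 1 ≤ best0) (prev : List Int)
    (hprev : prev = if i = 0 then List.replicate (pvM b) 1 else pvDpRow b (i - 1)) :
    pvRowFold b ((PySem.List.pyGetD b 0 []).length : Int) (i : Int) (PySem.List.pyGetD b (i : Int) []) (best0, prev)
      = (pvPartBest b i (pvM b) best0, pvDpRow b i) := by
  unfold pvRowFold
  have hm : ((PySem.List.pyGetD b 0 []).length : Int) = ((pvM b : Nat) : Int) := by
    rw [pvMeq b hpre.1]; rfl
  simp only [hm, PySem.List.pyRepeat_singleton, Int.toNat_natCast]
  have hinit1 : pvPartBest b i 1 best0 = best0 := by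
    unfold pvPartBest
    rw [List.range_one]
    simp [pvDp_zero_right]
    omega
  have hfold := pvInnerFold b hpre i hi best0 hb0 prev hprev (pvM b - 1) 1 le_rfl
    (by have h2 : 0 < pvM b := hpre.2.1; omega)
  rw [show ((1 : Nat) : Int) = (1 : Int) from rfl, hinit1, pvCurL_one b i] at hfold
  rw [hfold, pvCurL_full b i]

lemma pvBestG_pos (b : List (List Int)) (i : Nat) : 1 ≤ pvBestG b i := by
  induction i with
  | zero => simp [pvBestG]
  | succ i ih =>
    unfold pvBestG
    rw [List.range_succ, List.foldl_append, List.foldl_cons, List.foldl_nil]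
    have hrw : (List.range i).foldl (fun acc i' => pvPartBest b i' (pvM b) acc) 1 = pvBestG b i := rfl
    rw [hrw]
    exact le_trans ih (pvPartBest_ge b i (pvM b) (pvBestG b i))

lemma pvB_eq (b : List (List Int)) (hpre : Pre_solution b) :
    solution_alt b = pvBestG b (pvN b) * pvBestG b (pvN b) := by
  rw [solution_alt_eq]
  have hm : ((PySem.List.pyGetD b 0 []).length : Int) = ((pvM b : Nat) : Int) := by
    rw [pvMeq b hpre.1]; rfl
  have hRF := pvRowFold_eq b hpre
  rw [hm] at hRF
  simp only [hm, PySem.List.pyRepeat_singleton, Int.toNat_natCast,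
    PySem.List.enumerate_eq_map_pyRange b ([] : List Int), List.foldl_map,
    PySem.List.len_eq, PySem.List.pyRange_zero_natCast]
  have main : ∀ i ≤ pvN b,
      (List.range i).foldl (fun s i' =>
          pvRowFold b ((pvM b : Nat) : Int) ((i' : Nat) : Int) (PySem.List.pyGetD b ((i' : Nat) : Int) []) s)
        (1, List.replicate (pvM b) 1)
      = (pvBestG b i, if i = 0 then List.replicate (pvM b) 1 else pvDpRow b (i - 1)) := by
    intro i
    induction i with
    | zero => intro _; rfl
    | succ i ih =>
      intro hin
      rw [List.range_succ, List.foldl_append, List.foldl_cons, List.foldl_nil,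
        ih (by omega), hRF i (by omega) (pvBestG b i) (pvBestG_pos b i) _ rfl]
      have h1 : pvBestG b (i + 1) = pvPartBest b i (pvM b) (pvBestG b i) := by
        unfold pvBestG
        rw [List.range_succ, List.foldl_append]
        rfl
      rw [h1]
      simp
  rw [show List.range b.length = List.range (pvN b) from rfl, main (pvN b) le_rfl]

-- ----- best = K -----

lemma pvBestG_flat (b : List (List Int)) (n : Nat) :
    pvBestG b n = ((List.range n).flatMap (fun i => (List.range (pvM b)).map (fun j => (pvDp b i j : Int)))).foldl max 1 := by
  induction n with
  | zero => rfl
  | succ n ih =>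
    have h1 : pvBestG b (n + 1) = pvPartBest b n (pvM b) (pvBestG b n) := by
      unfold pvBestG
      rw [List.range_succ, List.foldl_append]
      rfl
    have h2 : pvPartBest b n (pvM b) (pvBestG b n)
        = ((List.range (pvM b)).map (fun j => ((pvDp b n j : Nat) : Int))).foldl max (pvBestG b n) := by
      unfold pvPartBest
      rw [List.foldl_map]
    rw [h1, h2, ih, List.range_succ, List.flatMap_append, List.foldl_append]
    simp

lemma pvDp_le_K (b : List (List Int)) (hpre : Pre_solution b) (i j : Nat)
    (hi : i < pvN b) (hj : j < pvM b) : pvDp b i j ≤ pvK b := by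
  have hs1 := pvDp_pos b i j
  obtain ⟨⟨hsi, hsj⟩, hU⟩ := pvDp_spec b i j
  apply Nat.le_findGreatest (by omega)
  exact ⟨i + 1 - pvDp b i j, by omega, j + 1 - pvDp b i j, by omega, ⟨by omega, by omega⟩, hU⟩

lemma pvK_le_best (b : List (List Int)) (hpre : Pre_solution b) :
    (pvK b : Int) ≤ pvBestG b (pvN b) := by
  have hK1 := pvK_pos b hpre
  have h1min : 1 ≤ min (pvN b) (pvM b) := by
    have hn : 0 < pvN b := List.length_pos_iff.mpr hpre.1
    have hm : 0 < pvM b := hpre.2.1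
    omega
  have hKsq : pvHasSq b (pvK b) := Nat.findGreatest_spec h1min (pvHasSq_one b hpre)
  obtain ⟨i, hi, j, hj, ⟨hik, hjk⟩, hU⟩ := hKsq
  have hBR : pvBR b (i + pvK b - 1) (j + pvK b - 1) (pvK b) := by
    refine ⟨⟨by omega, by omega⟩, ?_⟩
    rw [show i + pvK b - 1 + 1 - pvK b = i from by omega,
      show j + pvK b - 1 + 1 - pvK b = j from by omega]
    exact hU
  have hdp : pvK b ≤ pvDp b (i + pvK b - 1) (j + pvK b - 1) :=
    Nat.le_findGreatest (by omega) hBR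
  have hmem : ((pvDp b (i + pvK b - 1) (j + pvK b - 1) : Nat) : Int) ∈
      (List.range (pvN b)).flatMap (fun i' => (List.range (pvM b)).map (fun j' => ((pvDp b i' j' : Nat) : Int))) := by
    rw [List.mem_flatMap]
    exact ⟨i + pvK b - 1, by rw [List.mem_range]; omega, by
      simp only [List.mem_map, List.mem_range]
      exact ⟨j + pvK b - 1, by omega, rfl⟩⟩
  have hle := (PySem.List.le_foldl_max _ 1).2 _ hmem
  rw [pvBestG_flat]
  calc ((pvK b : Nat) : Int) ≤ ((pvDp b (i + pvK b - 1) (j + pvK b - 1) : Nat) : Int) := by exact_mod_cast hdp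
  _ ≤ _ := hle

lemma pvBest_le_K (b : List (List Int)) (hpre : Pre_solution b) :
    pvBestG b (pvN b) ≤ (pvK b : Int) := by
  rw [pvBestG_flat]
  rcases PySem.List.foldl_max_mem ((List.range (pvN b)).flatMap (fun i' => (List.range (pvM b)).map (fun j' => ((pvDp b i' j' : Nat) : Int)))) 1 with h | h
  · rw [h]
    have := pvK_pos b hpre
    omega
  · rw [List.mem_flatMap] at h
    obtain ⟨i', hi', hmem⟩ := h
    simp only [List.mem_map, List.mem_range] at hmem
    obtain ⟨j', hj', heq⟩ := hmem
    rw [List.mem_range] at hi'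
    rw [← heq]
    exact_mod_cast pvDp_le_K b hpre i' j' hi' hj' 

-- ===== VERDICT (by name: the statement is the Claim_ definition above) =====
theorem solution_spec : Claim_equal_solution := by
  intro b hdom hpre
  unfold Spec_solution
  have hbk := (pvK_le_best b hpre).antisymm (pvBest_le_K b hpre)
  rw [pvA_eq b hpre, pvB_eq b hpre, hbk]
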